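-- pv_equiv track=rewrite | github.com/ArtemDMI/ArtemDMI.github.io | start/update_index.py | _split_by_dash_separators
-- ===== SOURCE A (Python) =====
-- def _is_dash_separator(line: str) -> bool:
--     """True if line after strip() is non-empty and consists only of '-'."""
--     s = line.strip()
--     return bool(s) and all(c == "-" for c in s)
--
-- def _split_by_dash_separators(lines: list[str]) -> list[str]:
--     """
--     Split lines into segments: content between runs of dash-only lines.
--     One or more consecutive dash lines count as a single separator (not included in segments).
--     """
--     segments: list[str] = []
--     current: list[str] = []
--     i = 0
--     while i < len(lines):
--         if _is_dash_separator(lines[i]):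
--             segments.append("\n".join(current))
--             current = []
--             while i < len(lines) and _is_dash_separator(lines[i]):
--                 i += 1
--             continue
--         current.append(lines[i])
--         i += 1
--     segments.append("\n".join(current))
--     return segments
-- ===== SOURCE B (Python) =====
-- def _is_dash_separator(line: str) -> bool:
--     """True if line after strip() is non-empty and consists only of '-'."""
--     s = line.strip()
--     return bool(s) and all(c == "-" for c in s)
--
-- def _split_by_dash_separators(lines: list[str]) -> list[str]:
--     # Group-first decomposition: split lines into maximal runs of equal
--     # separator-ness, then fold over the runs flushing on separator runs.
--     groups = []
--     rest = lines
--     while rest: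
--         key = _is_dash_separator(rest[0])
--         k = 1
--         while k < len(rest) and _is_dash_separator(rest[k]) == key:
--             k += 1
--         groups.append((key, rest[:k]))
--         rest = rest[k:]
--     segments = []
--     current = []
--     for key, group in groups:
--         if key:
--             segments.append("\n".join(current))
--             current = []
--         else:
--             current.extend(group)
--     segments.append("\n".join(current))
--     return segments
-- ===== Notes on version B (the rewrite author's own statement) =====
-- stated objective: alternative
-- what changed: Replaces A's single index-based state machine (with an inner skip loop over separator runs) by a group-first decomposition: a grouping pass that splits the lines into maximal runs of equal separator-ness, then a fold over the runs that flushes on separator runs and extends on content runs.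
import Mathlib
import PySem

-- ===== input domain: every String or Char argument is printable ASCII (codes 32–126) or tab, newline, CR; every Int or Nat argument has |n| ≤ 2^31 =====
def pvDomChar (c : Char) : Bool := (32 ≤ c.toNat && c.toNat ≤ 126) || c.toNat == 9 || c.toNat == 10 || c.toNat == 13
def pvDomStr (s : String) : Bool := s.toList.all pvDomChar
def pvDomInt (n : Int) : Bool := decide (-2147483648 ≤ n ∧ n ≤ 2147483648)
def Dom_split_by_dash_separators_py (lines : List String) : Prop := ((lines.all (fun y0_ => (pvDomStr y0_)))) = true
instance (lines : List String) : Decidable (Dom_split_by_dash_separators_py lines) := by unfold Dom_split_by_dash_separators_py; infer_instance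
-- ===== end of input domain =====

-- B replaces A's index-based state machine by a group-then-fold decomposition (alternative, same cost).

-- ===== PORT A =====
-- _is_dash_separator (helper of both Pythons)
def isDashSep (line : String) : Bool :=
  let cs := (PySem.Str.strip line).toList
  !cs.isEmpty && cs.all (· == '-')

-- A's while loop: index i over lines, inner while skipping a separator run
def goA (rest segments current : List String) : List String :=
  match rest with
  | [] => segments ++ [PySem.Str.join "\n" current]
  | l :: xs =>
    if isDashSep l then
      goA (xs.dropWhile isDashSep) (segments ++ [PySem.Str.join "\n" current]) []
    else
      goA xs segments (current ++ [l])
termination_by rest.length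
decreasing_by
· have := List.length_dropWhile_le isDashSep xs; simpa using Nat.lt_succ_of_le this
· simp

def split_by_dash_separators_py (lines : List String) : List String :=
  goA lines [] []

-- ===== PORT B =====
-- B's grouping pass: maximal runs of equal separator-ness (key, run)
def groupsB (rest : List String) : List (Bool × List String) :=
  match rest with
  | [] => []
  | x :: xs =>
    let key := isDashSep x
    (key, x :: xs.takeWhile (fun y => isDashSep y == key)) ::
      groupsB (xs.dropWhile (fun y => isDashSep y == key))
termination_by rest.length
decreasing_by
  have := List.length_dropWhile_le (fun y => isDashSep y == isDashSep x) xs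
  simpa using Nat.lt_succ_of_le this

-- B's fold over the runs: flush on a separator run, extend on a content run
def goB (groups : List (Bool × List String)) (segments current : List String) : List String :=
  match groups with
  | [] => segments ++ [PySem.Str.join "\n" current]
  | (key, g) :: gs =>
    if key then goB gs (segments ++ [PySem.Str.join "\n" current]) []
    else goB gs segments (current ++ g)

def split_by_dash_separators_py_alt (lines : List String) : List String :=
  goB (groupsB lines) [] []

-- ===== PRECONDITION & SPEC =====
def Spec_split_by_dash_separators_py (lines : List String) (out : List String) : Prop := out = split_by_dash_separators_py_alt lines
instance (lines : List String) (out : List String) : Decidable (Spec_split_by_dash_separators_py lines out) := by unfold Spec_split_by_dash_separators_py; infer_instance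

-- ===== CLAIM (what is proved, stated in full; the proofs are below) =====
def Claim_equal_split_by_dash_separators_py : Prop := ∀ (lines : List String), Dom_split_by_dash_separators_py lines → Spec_split_by_dash_separators_py lines (split_by_dash_separators_py lines)

-- ===== LEMMAS AND PROOFS =====

-- A's loop consumes a run of non-separator lines by moving it onto `current`
theorem goA_content_prefix (t : List String) (ht : ∀ y ∈ t, isDashSep y = false) :
    ∀ (r segs cur : List String), goA (t ++ r) segs cur = goA r segs (cur ++ t) := by
  induction t with
  | nil => intro r segs cur; simp
  | cons y t ih =>
    intro r segs cur
    have hy : isDashSep y = false := ht y (by simp)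
    rw [List.cons_append, goA, if_neg (by simp [hy])]
    rw [ih (fun z hz => ht z (by simp [hz])) r segs (cur ++ [y])]
    simp

theorem goA_eq_goB_groupsB : ∀ (n : Nat) (l : List String), l.length ≤ n →
    ∀ (segs cur : List String), goA l segs cur = goB (groupsB l) segs cur := by
  intro n
  induction n with
  | zero =>
    intro l hl segs cur
    have : l = [] := List.eq_nil_of_length_eq_zero (Nat.le_zero.mp hl)
    subst this
    simp [goA, groupsB, goB]
  | succ n ih =>
    intro l hl segs cur
    match l with
    | [] => simp [goA, groupsB, goB]
    | x :: xs =>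
      by_cases h : isDashSep x = true
      · rw [goA, if_pos h, groupsB]
        simp only [h]
        rw [goB, if_pos rfl]
        have hfun : (fun y => isDashSep y == true) = isDashSep := by
          funext y; cases isDashSep y <;> simp
        rw [hfun]
        exact ih _ (le_trans (List.length_dropWhile_le _ _) (by simpa using hl)) _ _
      · have hx : isDashSep x = false := by simpa using h
        set q : String → Bool := fun y => isDashSep y == false with hq
        rw [goA, if_neg (by simp [hx]), groupsB]
        simp only [hx]
        rw [goB, if_neg (by simp)]
        have hsplit : xs = xs.takeWhile q ++ xs.dropWhile q := (List.takeWhile_append_dropWhile).symm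
        have htake : ∀ y ∈ xs.takeWhile q, isDashSep y = false := by
          intro y hy
          have := List.mem_takeWhile_imp hy
          simpa [hq] using this
        calc goA xs segs (cur ++ [x])
            = goA (xs.takeWhile q ++ xs.dropWhile q) segs (cur ++ [x]) := by rw [← hsplit]
          _ = goA (xs.dropWhile q) segs (cur ++ [x] ++ xs.takeWhile q) :=
              goA_content_prefix _ htake _ _ _
          _ = goB (groupsB (xs.dropWhile q)) segs (cur ++ [x] ++ xs.takeWhile q) := by
              refine ih _ (le_trans (List.length_dropWhile_le _ _) (by simpa using hl)) _ _
          _ = goB (groupsB (xs.dropWhile q)) segs (cur ++ (x :: xs.takeWhile q)) := by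
              simp

-- ===== VERDICT (by name: the statement is the Claim_ definition above) =====
theorem split_by_dash_separators_py_spec : Claim_equal_split_by_dash_separators_py := by
  intro lines _
  unfold Spec_split_by_dash_separators_py split_by_dash_separators_py split_by_dash_separators_py_alt
  exact goA_eq_goB_groupsB lines.length lines le_rfl [] []
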